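-- pv_equiv track=rewrite | github.com/sujaybr/newsapp | ml/bccDataLoad_for_density.py | proc
-- ===== SOURCE A (Python) =====
-- def proc(data):
-- 	a = []
-- 	for i in data:
-- 		if ord(i) >= ord('a') and ord(i) <= ord('z') or ord(i) >= ord('A') and ord(i) <= ord('Z') or ord(i) == ord(' '):
-- 			a.append(i.lower())
-- 		else:
-- 			a.append(' ')
--
-- 	return "".join(a)
-- ===== SOURCE B (Python) =====
-- import re
--
-- def proc(data):
--     return re.sub('[^a-zA-Z ]', ' ', data).lower()
-- ===== Notes on version B (the rewrite author's own statement) =====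
-- stated objective: idiomatic
-- what changed: Replaced the per-character ord-range loop with list appending by a two-pass whole-string approach: one regex substitution mapping every non-letter/non-space character to a space, then a single .lower() on the result.
import Mathlib
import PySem

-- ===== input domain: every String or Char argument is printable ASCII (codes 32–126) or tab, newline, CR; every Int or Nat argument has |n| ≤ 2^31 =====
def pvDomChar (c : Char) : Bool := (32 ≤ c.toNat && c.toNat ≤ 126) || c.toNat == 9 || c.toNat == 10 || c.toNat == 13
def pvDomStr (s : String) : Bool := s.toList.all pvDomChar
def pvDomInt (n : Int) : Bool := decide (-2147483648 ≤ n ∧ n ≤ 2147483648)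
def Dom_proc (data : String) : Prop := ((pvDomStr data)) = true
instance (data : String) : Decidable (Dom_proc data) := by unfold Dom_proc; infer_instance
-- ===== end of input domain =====

-- B replaces A's per-character ord-range loop with two whole-string passes: a
-- substitution turning every non-letter/non-space into a space, then a lowercasing
-- pass (objective: idiomatic).

-- ===== PORT A =====
-- literal port of A: one loop over the characters appending i.lower() or ' ' to an
-- accumulator list, then join (ord-comparisons = Char-order comparisons on code points)
def proc (data : String) : String :=
  let a := data.toList.foldl (fun (acc : List Char) (i : Char) =>
    if ('a' ≤ i ∧ i ≤ 'z') ∨ ('A' ≤ i ∧ i ≤ 'Z') ∨ i = ' ' then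
      acc ++ [PySem.Chars.lowerChar i]
    else
      acc ++ [' ']) []
  String.ofList a

-- ===== PORT B =====
-- pass 1 = the regex substitution [^a-zA-Z ] -> ' ' (exact for this pattern: a
-- character-class substitution maps each character independently); pass 2 = .lower()
def procSub (data : String) : String :=
  String.ofList (data.toList.map (fun c =>
    if ('a' ≤ c ∧ c ≤ 'z') ∨ ('A' ≤ c ∧ c ≤ 'Z') ∨ c = ' ' then c else ' '))

def proc_alt (data : String) : String :=
  PySem.Str.lower (procSub data)

-- ===== PRECONDITION & SPEC =====
def Spec_proc (data : String) (out : String) : Prop := out = proc_alt data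
instance (data : String) (out : String) : Decidable (Spec_proc data out) := by unfold Spec_proc; infer_instance

-- ===== CLAIM (what is proved, stated in full; the proofs are below) =====
def Claim_equal_proc : Prop := ∀ (data : String), Dom_proc data → Spec_proc data (proc data)

-- ===== LEMMAS AND PROOFS =====

theorem foldl_append_map (l : List Char) (f : Char → Char) (acc : List Char) :
    l.foldl (fun acc i => acc ++ [f i]) acc = acc ++ l.map f := by
  induction l generalizing acc with
  | nil => simp
  | cons c cs ih => simp [List.foldl, ih]

theorem char_case (i : Char) :
    (if ('a' ≤ i ∧ i ≤ 'z') ∨ ('A' ≤ i ∧ i ≤ 'Z') ∨ i = ' ' then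
       PySem.Chars.lowerChar i else ' ') =
    PySem.Chars.lowerChar
      (if ('a' ≤ i ∧ i ≤ 'z') ∨ ('A' ≤ i ∧ i ≤ 'Z') ∨ i = ' ' then i else ' ') := by
  split <;> rfl

-- ===== VERDICT (by name: the statement is the Claim_ definition above) =====
theorem proc_spec : Claim_equal_proc := by
  intro data _
  unfold Spec_proc proc_alt procSub proc
  have h : (fun (acc : List Char) (i : Char) =>
      if ('a' ≤ i ∧ i ≤ 'z') ∨ ('A' ≤ i ∧ i ≤ 'Z') ∨ i = ' ' then
        acc ++ [PySem.Chars.lowerChar i] else acc ++ [' ']) =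
      (fun (acc : List Char) (i : Char) => acc ++
        [if ('a' ≤ i ∧ i ≤ 'z') ∨ ('A' ≤ i ∧ i ≤ 'Z') ∨ i = ' ' then
           PySem.Chars.lowerChar i else ' ']) := by
    funext acc i; split <;> rfl
  simp only [h, foldl_append_map, List.nil_append]
  apply String.toList_injective
  simp only [PySem.Str.toList_lower, String.toList_ofList, PySem.Chars.lower, List.map_map]
  exact List.map_congr_left (fun i _ => char_case i)
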